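-- pv_equiv track=rewrite | github.com/hed-standard/hed-python | hedtools/hed/util/hed_string_util.py | split_hed_string
-- ===== SOURCE A (Python) =====
-- def split_hed_string(hed_string):
--     """
--     Takes a hed string and splits it into delimiters and tags
--
--     Note: This does not validate tags or delimiters in any form.
--
--     Parameters
--     ----------
--         hed_string: string
--             the hed string to split
--     Returns
--     -------
--     [tuple]
--         each tuple: (is_hed_tag, (start_pos, end_pos))
--         is_hed_tag: bool
--             This is a (possible) hed tag if true, delimiter if not
--         start_pos: int
--             index of start of string in hed_string
--         end_pos: int
--             index of end of string in hed_string
--     """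
--     tag_delimiters = ",()"
--     current_spacing = 0
--     found_symbol = True
--     result_positions = []
--     tag_start_pos = None
--     last_end_pos = 0
--     for i, char in enumerate(hed_string):
--         if char == " ":
--             current_spacing += 1
--             continue
--
--         if char in tag_delimiters:
--             if found_symbol:
--                 # view_string = hed_string[last_end_pos: i]
--                 if last_end_pos != i:
--                     result_positions.append((False, (last_end_pos, i)))
--                 last_end_pos = i
--             elif not found_symbol:
--                 found_symbol = True
--                 last_end_pos = i - current_spacing
--                 # view_string = hed_string[tag_start_pos: last_end_pos]
--                 result_positions.append((True, (tag_start_pos, last_end_pos)))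
--                 current_spacing = 0
--                 tag_start_pos = None
--             continue
--
--         # If we have a current delimiter, end it here.
--         if found_symbol and last_end_pos is not None:
--             # view_string = hed_string[last_end_pos: i]
--             if last_end_pos != i:
--                 result_positions.append((False, (last_end_pos, i)))
--             last_end_pos = None
--
--         found_symbol = False
--         current_spacing = 0
--         if tag_start_pos is None:
--             tag_start_pos = i
--
--     if last_end_pos is not None and len(hed_string) != last_end_pos:
--         # view_string = hed_string[last_end_pos: len(hed_string)]
--         result_positions.append((False, (last_end_pos, len(hed_string))))
--     if tag_start_pos is not None:
--         # view_string = hed_string[tag_start_pos: len(hed_string)]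
--         result_positions.append((True, (tag_start_pos, len(hed_string) - current_spacing)))
--         if current_spacing:
--             result_positions.append((False, (len(hed_string) - current_spacing, len(hed_string))))
--
--     return result_positions
-- ===== SOURCE B (Python) =====
-- def split_hed_string(hed_string):
--     n = len(hed_string)
--     anchors = [i for i, c in enumerate(hed_string) if c in ",()"]
--     result = []
--     open_start = 0
--     lo = 0
--     for a in anchors + [n]:
--         seg = hed_string[lo:a]
--         lead = len(seg) - len(seg.lstrip(" "))
--         if lead != len(seg):
--             t = lo + lead
--             e = a - (len(seg) - len(seg.rstrip(" ")))
--             if t > open_start: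
--                 result.append((False, (open_start, t)))
--             result.append((True, (t, e)))
--             open_start = e
--         elif a < n:
--             if a > open_start:
--                 result.append((False, (open_start, a)))
--             open_start = a
--         lo = a + 1
--     if open_start < n:
--         result.append((False, (open_start, n)))
--     return result
-- ===== Notes on version B (the rewrite author's own statement) =====
-- stated objective: alternative
-- what changed: Replaces A's single-pass boolean/spacing state machine with a two-pass anchor-driven scan: first collect the indices of all delimiter characters, then emit tag/delimiter spans per inter-anchor segment using lstrip/rstrip arithmetic, with no found_symbol/tag_start state.
import Mathlib
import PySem

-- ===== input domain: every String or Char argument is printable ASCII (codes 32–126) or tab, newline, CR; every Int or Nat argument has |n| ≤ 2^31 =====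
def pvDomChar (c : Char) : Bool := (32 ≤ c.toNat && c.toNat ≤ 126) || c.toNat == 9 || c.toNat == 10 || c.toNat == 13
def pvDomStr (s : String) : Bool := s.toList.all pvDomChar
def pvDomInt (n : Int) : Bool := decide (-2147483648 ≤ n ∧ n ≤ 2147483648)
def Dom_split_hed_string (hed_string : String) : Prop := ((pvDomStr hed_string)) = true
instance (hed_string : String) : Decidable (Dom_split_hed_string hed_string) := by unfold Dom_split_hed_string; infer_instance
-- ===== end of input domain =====

-- B replaces A's boolean/spacing state machine by an anchor-driven two-pass scan
-- (collect delimiter positions, then emit spans per segment); objective: alternative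
-- decomposition, same O(n) cost.  Return-value equivalence only (neither mutates).

-- ===== PORT A =====

structure SplitSt where
  spacing  : Int                         -- current_spacing
  found    : Bool                        -- found_symbol
  res      : List (Bool × (Int × Int))   -- result_positions
  tagStart : Option Int                  -- tag_start_pos
  lastEnd  : Option Int                  -- last_end_pos
  deriving Repr, DecidableEq

-- the body of A's `for i, char in enumerate(hed_string)` loop
-- (`.getD 0` ports an int read of a variable that is never None on those paths in A)
def splitStep (st : SplitSt) (ic : Int × Char) : SplitSt :=
  if ic.2 == ' ' then
    { st with spacing := st.spacing + 1 }
  else if ic.2 == ',' || ic.2 == '(' || ic.2 == ')' then   -- char in ",()"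
    if st.found then
      { st with
        res := if st.lastEnd != some ic.1 then st.res ++ [(false, (st.lastEnd.getD 0, ic.1))] else st.res,
        lastEnd := some ic.1 }
    else
      { st with
        found := true,
        lastEnd := some (ic.1 - st.spacing),
        res := st.res ++ [(true, (st.tagStart.getD 0, ic.1 - st.spacing))],
        spacing := 0,
        tagStart := none }
  else
    let st' :=
      if st.found && st.lastEnd.isSome then
        { st with
          res := if st.lastEnd != some ic.1 then st.res ++ [(false, (st.lastEnd.getD 0, ic.1))] else st.res,
          lastEnd := none }
      else st
    { st' with
      found := false,
      spacing := 0,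
      tagStart := if st'.tagStart.isNone then some ic.1 else st'.tagStart }

def split_hed_string (hed_string : String) : List (Bool × (Int × Int)) :=
  let st := (PySem.List.enumerate hed_string.toList 0).foldl splitStep ⟨0, true, [], none, some 0⟩
  let n : Int := (hed_string.toList.length : Int)   -- len(hed_string)
  let res :=
    match st.lastEnd with                            -- if last_end_pos is not None and len != last_end_pos
    | some p => if n ≠ p then st.res ++ [(false, (p, n))] else st.res
    | none => st.res
  match st.tagStart with                             -- if tag_start_pos is not None
  | some t =>
    let res := res ++ [(true, (t, n - st.spacing))]
    if st.spacing ≠ 0 then res ++ [(false, (n - st.spacing, n))] else res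
  | none => res

-- ===== PORT B =====

-- the body of B's `for a in anchors + [n]` loop; state = (result, open_start, lo);
-- `seg.dropWhile (· == ' ')` / the reverse form port seg.lstrip(" ") / seg.rstrip(" ") exactly
def altStep (cs : List Char) (n : Int) (st : List (Bool × (Int × Int)) × Int × Int) (a : Int) :
    List (Bool × (Int × Int)) × Int × Int :=
  let seg := PySem.List.slice cs (some st.2.2) (some a)        -- hed_string[lo:a]
  let lead : Int := (seg.length : Int) - ((seg.dropWhile (· == ' ')).length : Int)
  if lead ≠ (seg.length : Int) then
    let t := st.2.2 + lead
    let e := a - ((seg.length : Int) - (((seg.reverse.dropWhile (· == ' ')).reverse).length : Int))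
    let res := if t > st.2.1 then st.1 ++ [(false, (st.2.1, t))] else st.1
    (res ++ [(true, (t, e))], e, a + 1)
  else if a < n then
    ((if a > st.2.1 then st.1 ++ [(false, (st.2.1, a))] else st.1), a, a + 1)
  else
    (st.1, st.2.1, a + 1)

def split_hed_string_alt (hed_string : String) : List (Bool × (Int × Int)) :=
  let cs := hed_string.toList
  let n : Int := (cs.length : Int)
  let anchors := ((PySem.List.enumerate cs 0).filter
      (fun p => p.2 == ',' || p.2 == '(' || p.2 == ')')).map (·.1)
  let st := (anchors ++ [n]).foldl (altStep cs n) ([], 0, 0)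
  if st.2.1 < n then st.1 ++ [(false, (st.2.1, n))] else st.1

-- ===== PRECONDITION & SPEC =====
def Spec_split_hed_string (hed_string : String) (out : List (Bool × (Int × Int))) : Prop := out = split_hed_string_alt hed_string
instance (hed_string : String) (out : List (Bool × (Int × Int))) : Decidable (Spec_split_hed_string hed_string out) := by unfold Spec_split_hed_string; infer_instance

-- ===== CLAIM (what is proved, stated in full; the proofs are below) =====
def Claim_equal_split_hed_string : Prop := ∀ (hed_string : String), Dom_split_hed_string hed_string → Spec_split_hed_string hed_string (split_hed_string hed_string)

-- ===== LEMMAS AND PROOFS =====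

def isDel (c : Char) : Bool := c == ',' || c == '(' || c == ')'

-- reference function: output of the split on suffix `cs` starting at absolute
-- position i0 with the currently open delimiter span starting at p
def specFn (cs : List Char) (i0 p : Int) : List (Bool × (Int × Int)) :=
  let u := cs.takeWhile (fun c => !isDel c)
  let t := i0 + ((u.takeWhile (· == ' ')).length : Int)
  let e := i0 + ((u.reverse.dropWhile (· == ' ')).length : Int)
  let hasTag := u.dropWhile (· == ' ') ≠ []
  let tagOut := (if p < t then [(false, (p, t))] else []) ++ [(true, (t, e))]
  match h : cs.dropWhile (fun c => !isDel c) with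
  | [] =>
    let n := i0 + (cs.length : Int)
    if hasTag then tagOut ++ (if e < n then [(false, (e, n))] else [])
    else if p < n then [(false, (p, n))] else []
  | _ :: rest =>
    let b := i0 + (u.length : Int)
    if hasTag then tagOut ++ specFn rest (b + 1) e
    else (if p < b then [(false, (p, b))] else []) ++ specFn rest (b + 1) b
termination_by cs.length
decreasing_by
  all_goals
    have h1 : (cs.dropWhile (fun c => !isDel c)).length ≤ cs.length := List.length_dropWhile_le _ _
    rw [h] at h1
    simp only [List.length_cons] at h1
    omega


-- A's trailing code after the loop, as a function of the final state
def finalizeA (n : Int) (st : SplitSt) : List (Bool × (Int × Int)) :=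
  let res :=
    match st.lastEnd with
    | some p => if n ≠ p then st.res ++ [(false, (p, n))] else st.res
    | none => st.res
  match st.tagStart with
  | some t =>
    let res := res ++ [(true, (t, n - st.spacing))]
    if st.spacing ≠ 0 then res ++ [(false, (n - st.spacing, n))] else res
  | none => res

-- B's trailing append, as a function of the final state
def finalizeB (n : Int) (st : List (Bool × (Int × Int)) × Int × Int) : List (Bool × (Int × Int)) :=
  if st.2.1 < n then st.1 ++ [(false, (st.2.1, n))] else st.1

-- evolution of A's current_spacing across a delimiter-free run
def tsp (s : Int) (u : List Char) : Int := u.foldl (fun s c => if c == ' ' then s + 1 else 0) s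

def anchorsE (cs : List Char) (s : Int) : List Int :=
  ((PySem.List.enumerate cs s).filter (fun p => isDel p.2)).map (·.1)

lemma split_eq_finalizeA (hs : String) :
    split_hed_string hs =
      finalizeA ((hs.toList.length : Int))
        ((PySem.List.enumerate hs.toList 0).foldl splitStep ⟨0, true, [], none, some 0⟩) := rfl

lemma alt_eq_finalizeB (hs : String) :
    split_hed_string_alt hs =
      finalizeB ((hs.toList.length : Int))
        ((anchorsE hs.toList 0 ++ [(hs.toList.length : Int)]).foldl
          (altStep hs.toList ((hs.toList.length : Int))) ([], 0, 0)) := rfl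

lemma tsp_append (s : Int) (u v : List Char) : tsp s (u ++ v) = tsp (tsp s u) v := List.foldl_append

lemma tsp_eq_rstrip (s : Int) (u : List Char) (h : u.dropWhile (· == ' ') ≠ []) :
    tsp s u = (u.length : Int) - ((u.reverse.dropWhile (· == ' ')).length : Int) := by
  induction u using List.reverseRecOn generalizing s with
  | nil => simp at h
  | append_singleton v c ih =>
    by_cases hc : c = ' '
    · have hv : v.dropWhile (· == ' ') ≠ [] := by
        intro hv
        apply h
        rw [List.dropWhile_append]
        simp [hv, hc]
      rw [tsp_append]
      simp only [tsp, List.foldl_cons, List.foldl_nil, hc]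
      rw [show (List.foldl (fun s c => if c == ' ' then s + 1 else 0) s v) = tsp s v from rfl]
      rw [ih _ hv]
      simp [hc]
      omega
    · rw [tsp_append]
      simp only [tsp, List.foldl_cons, List.foldl_nil]
      have : (c == ' ') = false := by simp [hc]
      simp [this, List.dropWhile_cons, hc]

-- spaces only bump current_spacing
lemma foldA_spaces (sp : List Char) (h : ∀ c ∈ sp, c = ' ') (st : SplitSt) (i0 : Int) :
    (PySem.List.enumerate sp i0).foldl splitStep st = { st with spacing := st.spacing + (sp.length : Int) } := by
  induction sp generalizing st i0 with
  | nil => simp [PySem.List.enumerate_nil]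
  | cons c v ih =>
    have hc : c = ' ' := h c (by simp)
    rw [PySem.List.enumerate_cons, List.foldl_cons]
    rw [show splitStep st (i0, c) = { st with spacing := st.spacing + 1 } by simp [splitStep, hc]]
    rw [ih (fun c hc => h c (by simp [hc]))]
    simp; omega

lemma foldA_spaces' (sp : List Char) (h : ∀ c ∈ sp, c = ' ')
    (s : Int) (acc : List (Bool × (Int × Int))) (p : Int) (i0 : Int) :
    (PySem.List.enumerate sp i0).foldl splitStep ⟨s, true, acc, none, some p⟩ =
      ⟨s + (sp.length : Int), true, acc, none, some p⟩ := by
  rw [foldA_spaces sp h]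

-- inside a tag, a delimiter-free run only updates current_spacing
lemma foldA_intag (v : List Char) (hv : ∀ c ∈ v, isDel c = false)
    (s : Int) (acc : List (Bool × (Int × Int))) (t : Int) (i0 : Int) :
    (PySem.List.enumerate v i0).foldl splitStep ⟨s, false, acc, some t, none⟩ =
      ⟨tsp s v, false, acc, some t, none⟩ := by
  induction v generalizing s i0 with
  | nil => simp [PySem.List.enumerate_nil, tsp]
  | cons c v ih =>
    rw [PySem.List.enumerate_cons, List.foldl_cons]
    by_cases hc : c = ' '
    · rw [show splitStep ⟨s, false, acc, some t, none⟩ (i0, c) = ⟨s + 1, false, acc, some t, none⟩ by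
        simp [splitStep, hc]]
      rw [ih (fun c hc => hv c (by simp [hc]))]
      simp only [tsp, List.foldl_cons]
      simp [hc]
    · have hd := hv c (by simp)
      rw [show splitStep ⟨s, false, acc, some t, none⟩ (i0, c) = ⟨0, false, acc, some t, none⟩ by
        simp [splitStep, isDel] at *
        simp [hc, hd]]
      rw [ih (fun c hc => hv c (by simp [hc]))]
      simp only [tsp, List.foldl_cons]
      have : (c == ' ') = false := by simp [hc]
      simp [this]

-- a delimiter-free run containing a tag, from a clean state
lemma foldA_seg (u : List Char) (hu : ∀ c ∈ u, isDel c = false)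
    (ht : u.dropWhile (· == ' ') ≠ [])
    (s : Int) (acc : List (Bool × (Int × Int))) (p : Int) (i0 : Int) :
    (PySem.List.enumerate u i0).foldl splitStep ⟨s, true, acc, none, some p⟩ =
      ⟨tsp s u, false,
        acc ++ (if p ≠ i0 + ((u.takeWhile (· == ' ')).length : Int)
                then [(false, (p, i0 + ((u.takeWhile (· == ' ')).length : Int)))] else []),
        some (i0 + ((u.takeWhile (· == ' ')).length : Int)), none⟩ := by
  induction u generalizing i0 s with
  | nil => simp at ht
  | cons c v ih =>
    rw [PySem.List.enumerate_cons, List.foldl_cons]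
    by_cases hc : c = ' '
    · subst hc
      have ht' : v.dropWhile (· == ' ') ≠ [] := by
        rw [List.dropWhile_cons] at ht; simpa using ht
      rw [show splitStep ⟨s, true, acc, none, some p⟩ (i0, ' ') = ⟨s + 1, true, acc, none, some p⟩ from by
        simp [splitStep]]
      have e : i0 + (((' ' :: v).takeWhile (· == ' ')).length : Int) =
          (i0 + 1) + ((v.takeWhile (· == ' ')).length : Int) := by
        simp [List.takeWhile_cons]; push_cast; ring
      have h1 : tsp s (' ' :: v) = tsp (s + 1) v := by simp [tsp]
      rw [h1, e]
      exact ih (fun c hc => hu c (by simp [hc])) ht' (s + 1) (i0 + 1)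
    · have hcb : (c == ' ') = false := by simp [hc]
      have hdel : (c == ',' || c == '(' || c == ')') = false := hu c (by simp)
      have hv : ∀ x ∈ v, isDel x = false := fun x hx => hu x (by simp [hx])
      rw [show splitStep ⟨s, true, acc, none, some p⟩ (i0, c) =
          ⟨0, false, acc ++ (if p ≠ i0 then [(false, (p, i0))] else []), some i0, none⟩ from by
        simp only [splitStep, hcb, hdel, Bool.false_eq_true, if_false]
        simp [bne]
        split <;> simp_all]
      rw [foldA_intag v hv 0 _ i0 (i0 + 1)]
      have h1 : tsp s (c :: v) = tsp 0 v := by simp [tsp, hc]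
      have h2 : ((c :: v).takeWhile (· == ' ')).length = 0 := by
        simp [List.takeWhile_cons, hc]
      rw [h1, h2]
      simp

-- main A lemma: loop + finalize over any suffix from a clean state computes specFn
lemma Amain (m : Nat) : ∀ (cs : List Char), cs.length = m → ∀ (i0 p s : Int)
    (acc : List (Bool × (Int × Int))), p ≤ i0 →
    finalizeA (i0 + (cs.length : Int))
        ((PySem.List.enumerate cs i0).foldl splitStep ⟨s, true, acc, none, some p⟩) =
      acc ++ specFn cs i0 p := by
  induction m using Nat.strong_induction_on with
  | _ m IH =>
  intro cs hm i0 p s acc hp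
  have hsplit := (List.takeWhile_append_dropWhile (p := fun c => !isDel c) (l := cs)).symm
  have huDF : ∀ c ∈ cs.takeWhile (fun c => !isDel c), isDel c = false := by
    intro c hc
    have := List.mem_takeWhile_imp hc
    simpa using this
  rw [specFn.eq_def]
  cases hdw : cs.dropWhile (fun c => !isDel c) with
  | nil =>
    have hcu : cs.takeWhile (fun c => !isDel c) = cs := by
      conv_rhs => rw [hsplit, hdw]
      simp
    simp only []
    by_cases hT : (cs.takeWhile (fun c => !isDel c)).dropWhile (· == ' ') = []
    · -- all spaces / empty
      have hsp : ∀ c ∈ cs, c = ' ' := by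
        intro c hc
        have := List.dropWhile_eq_nil_iff.mp hT c (by rw [hcu]; exact hc)
        simpa using this
      rw [foldA_spaces cs hsp _ i0]
      simp only [finalizeA, hT]
      have hlen : (0:Int) ≤ (cs.length : Int) := by positivity
      rw [if_neg (show ¬(([] : List Char) ≠ []) by simp)]
      split_ifs with h1 h2
      · rfl
      · exfalso; omega
      · exfalso; omega
      · simp
    · -- has a tag
      have ht' : cs.dropWhile (· == ' ') ≠ [] := by rwa [hcu] at hT
      rw [show (PySem.List.enumerate cs i0) = (PySem.List.enumerate (cs.takeWhile (fun c => !isDel c)) i0) by rw [hcu]]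
      rw [foldA_seg _ huDF hT s acc p i0]
      rw [tsp_eq_rstrip s _ hT]
      rw [hcu]
      have h1 : (cs.reverse.dropWhile (· == ' ')).length ≤ cs.length := by
        calc _ ≤ cs.reverse.length := List.length_dropWhile_le _ _
        _ ≤ _ := by rw [List.length_reverse]
      simp only [finalizeA]
      rw [if_pos ht']
      have c1 : (p ≠ i0 + ((cs.takeWhile (· == ' ')).length : Int)) ↔
          (p < i0 + ((cs.takeWhile (· == ' ')).length : Int)) := by omega
      have c2 : ((cs.length : Int) - ((cs.reverse.dropWhile (· == ' ')).length : Int) ≠ 0) ↔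
          (i0 + ((cs.reverse.dropWhile (· == ' ')).length : Int) < i0 + (cs.length : Int)) := by omega
      have e1 : i0 + (cs.length : Int) - ((cs.length : Int) - ((cs.reverse.dropWhile (· == ' ')).length : Int)) =
          i0 + ((cs.reverse.dropWhile (· == ' ')).length : Int) := by ring
      simp only [c1, c2, e1]
      split_ifs with h3 <;> simp [List.append_assoc]
  | cons d rest =>
    set u := cs.takeWhile (fun c => !isDel c) with hu_def
    have hcu : cs = u ++ d :: rest := by rw [hsplit, hdw]
    have hne : cs.dropWhile (fun c => !isDel c) ≠ [] := by rw [hdw]; simp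
    have hd : isDel d = true := by
      have h0 := List.head_dropWhile_not (fun c => !isDel c) hne
      have hhead : (cs.dropWhile (fun c => !isDel c)).head hne = d := by simp [hdw]
      rw [hhead] at h0
      simpa using h0
    have hdd : (d == ',' || d == '(' || d == ')') = true := hd
    have hdsp : (d == ' ') = false := by
      simp only [isDel] at hd
      rcases (by simpa using hd : (d = ',' ∨ d = '(') ∨ d = ')') with (rfl | rfl) | rfl <;> decide
    have hrm : rest.length < m := by
      rw [← hm, hcu]; simp; omega
    have hlenu : (0:Int) ≤ (u.length : Int) := by positivity
    conv_lhs => rw [hcu]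
    rw [PySem.List.enumerate_append, List.foldl_append, PySem.List.enumerate_cons, List.foldl_cons]
    by_cases hT : u.dropWhile (· == ' ') = []
    · -- segment before the delimiter is all spaces (or empty)
      have hsp : ∀ c ∈ u, c = ' ' := by
        intro c hc
        simpa using List.dropWhile_eq_nil_iff.mp hT c hc
      rw [foldA_spaces' u hsp s acc p i0]
      rw [show splitStep ⟨s + (u.length : Int), true, acc, none, some p⟩ (i0 + (u.length : Int), d) =
          ⟨s + (u.length : Int), true,
            acc ++ (if p ≠ i0 + (u.length : Int) then [(false, (p, i0 + (u.length : Int)))] else []),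
            none, some (i0 + (u.length : Int))⟩ from by
        simp only [splitStep, hdsp, Bool.false_eq_true, if_false, hdd, if_pos]
        simp [bne]
        split <;> simp]
      have hIH := IH rest.length hrm rest rfl (i0 + (u.length : Int) + 1) (i0 + (u.length : Int)) (s + (u.length : Int))
        (acc ++ (if p ≠ i0 + (u.length : Int) then [(false, (p, i0 + (u.length : Int)))] else [])) (by omega)
      rw [show i0 + ((u ++ d :: rest).length : Int) = i0 + (u.length : Int) + 1 + (rest.length : Int) by
        simp; push_cast; ring]
      rw [hIH]
      have c1 : (p ≠ i0 + (u.length : Int)) ↔ (p < i0 + (u.length : Int)) := by omega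
      simp only [hT, if_neg, c1, List.append_assoc]
      simp
    · -- segment before the delimiter contains a tag
      rw [foldA_seg u huDF hT s acc p i0]
      rw [tsp_eq_rstrip s u hT]
      rw [show splitStep
            ⟨(u.length : Int) - ((u.reverse.dropWhile (· == ' ')).length : Int), false,
              acc ++ (if p ≠ i0 + ((u.takeWhile (· == ' ')).length : Int)
                      then [(false, (p, i0 + ((u.takeWhile (· == ' ')).length : Int)))] else []),
              some (i0 + ((u.takeWhile (· == ' ')).length : Int)), none⟩ (i0 + (u.length : Int), d) =
          ⟨0, true,
            (acc ++ (if p ≠ i0 + ((u.takeWhile (· == ' ')).length : Int)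
                     then [(false, (p, i0 + ((u.takeWhile (· == ' ')).length : Int)))] else []))
              ++ [(true, (i0 + ((u.takeWhile (· == ' ')).length : Int),
                    i0 + (u.length : Int) - ((u.length : Int) - ((u.reverse.dropWhile (· == ' ')).length : Int))))],
            none, some (i0 + (u.length : Int) - ((u.length : Int) - ((u.reverse.dropWhile (· == ' ')).length : Int)))⟩ from by
        simp only [splitStep, hdsp, Bool.false_eq_true, if_false, hdd, if_pos]
        simp]
      have hrl : ((u.reverse.dropWhile (· == ' ')).length) ≤ u.length := by
        calc _ ≤ u.reverse.length := List.length_dropWhile_le _ _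
        _ ≤ _ := by rw [List.length_reverse]
      have e1 : i0 + (u.length : Int) - ((u.length : Int) - ((u.reverse.dropWhile (· == ' ')).length : Int)) =
          i0 + ((u.reverse.dropWhile (· == ' ')).length : Int) := by ring
      rw [e1]
      have hIH := IH rest.length hrm rest rfl (i0 + (u.length : Int) + 1)
        (i0 + ((u.reverse.dropWhile (· == ' ')).length : Int)) 0
        ((acc ++ (if p ≠ i0 + ((u.takeWhile (· == ' ')).length : Int)
                  then [(false, (p, i0 + ((u.takeWhile (· == ' ')).length : Int)))] else []))
          ++ [(true, (i0 + ((u.takeWhile (· == ' ')).length : Int),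
                i0 + ((u.reverse.dropWhile (· == ' ')).length : Int)))]) (by omega)
      rw [show i0 + ((u ++ d :: rest).length : Int) = i0 + (u.length : Int) + 1 + (rest.length : Int) by
        simp; push_cast; ring]
      rw [hIH]
      have htw : ((u.takeWhile (· == ' ')).length) ≤ u.length := (List.takeWhile_prefix _).length_le
      have c1 : (p ≠ i0 + ((u.takeWhile (· == ' ')).length : Int)) ↔
          (p < i0 + ((u.takeWhile (· == ' ')).length : Int)) := by omega
      simp only [hT, if_pos, c1, List.append_assoc]
      simp [hT]

-- anchors of a delimiter-free run are empty
lemma anchorsE_df (u : List Char) (hu : ∀ c ∈ u, isDel c = false) (s : Int) :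
    anchorsE u s = [] := by
  unfold anchorsE
  rw [List.filter_eq_nil_iff.mpr ?_]
  · simp
  · intro x hx
    rcases (PySem.List.mem_enumerate_iff _ _ _).mp hx with ⟨k, hk, rfl⟩
    simp [hu _ (List.getElem_mem hk)]

lemma anchorsE_decomp (u : List Char) (hu : ∀ c ∈ u, isDel c = false)
    (d : Char) (hd : isDel d = true) (rest : List Char) (s : Int) :
    anchorsE (u ++ d :: rest) s =
      (s + (u.length : Int)) :: anchorsE rest (s + (u.length : Int) + 1) := by
  unfold anchorsE
  rw [PySem.List.enumerate_append, PySem.List.enumerate_cons]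
  rw [List.filter_append, List.map_append]
  rw [show ((PySem.List.enumerate u s).filter (fun p => isDel p.2)) = [] from
    List.filter_eq_nil_iff.mpr (fun x hx => by
      rcases (PySem.List.mem_enumerate_iff _ _ _).mp hx with ⟨k, hk, rfl⟩
      simp [hu _ (List.getElem_mem hk)])]
  simp [hd]

-- main B lemma
lemma Bmain (csfull : List Char) (m : Nat) : ∀ (tail : List Char), tail.length = m →
    ∀ (lo : Nat) (p : Int) (acc : List (Bool × (Int × Int))),
    tail = csfull.drop lo → lo ≤ csfull.length → 0 ≤ p → p ≤ (lo : Int) →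
    finalizeB ((csfull.length : Int))
        ((anchorsE tail (lo : Int) ++ [(csfull.length : Int)]).foldl
          (altStep csfull ((csfull.length : Int))) (acc, p, (lo : Int))) =
      acc ++ specFn tail (lo : Int) p := by
  induction m using Nat.strong_induction_on with
  | _ m IH =>
  intro tail hm lo p acc htail hlo hp0 hp
  have hlen : tail.length = csfull.length - lo := by rw [htail, List.length_drop]
  have hsplit := (List.takeWhile_append_dropWhile (p := fun c => !isDel c) (l := tail)).symm
  have huDF : ∀ c ∈ tail.takeWhile (fun c => !isDel c), isDel c = false := by
    intro c hc
    have := List.mem_takeWhile_imp hc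
    simpa using this
  rw [specFn.eq_def]
  cases hdw : tail.dropWhile (fun c => !isDel c) with
  | nil =>
    have hcu : tail.takeWhile (fun c => !isDel c) = tail := by
      conv_rhs => rw [hsplit, hdw]
      simp
    rw [anchorsE_df tail (by rw [← hcu]; exact huDF) (lo : Int)]
    rw [List.nil_append, List.foldl_cons, List.foldl_nil]
    have hseg : PySem.List.slice csfull (some (lo : Int)) (some ((csfull.length : Nat) : Int)) = tail := by
      rw [PySem.List.slice_natCast, ← htail]
      exact List.take_of_length_le (by omega)
    by_cases hT : tail.dropWhile (· == ' ') = []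
    · -- all spaces / empty
      have hstep : altStep csfull ((csfull.length : Nat) : Int) (acc, p, (lo : Int)) ((csfull.length : Nat) : Int) =
          (acc, p, ((csfull.length : Nat) : Int) + 1) := by
        simp only [altStep, hseg, hT]
        simp
      rw [hstep]
      simp only [finalizeB, hcu, hT]
      rw [if_neg (show ¬(([] : List Char) ≠ []) by simp)]
      have e1 : ((csfull.length : Nat) : Int) = (lo : Int) + (tail.length : Int) := by omega
      split_ifs with h1 h2
      · rw [e1]
      · exfalso; omega
      · exfalso; omega
      · simp
    · -- has a tag
      have hstep : altStep csfull ((csfull.length : Nat) : Int) (acc, p, (lo : Int)) ((csfull.length : Nat) : Int) =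
          ((if p < (lo : Int) + ((tail.takeWhile (· == ' ')).length : Int)
            then acc ++ [(false, (p, (lo : Int) + ((tail.takeWhile (· == ' ')).length : Int)))] else acc)
            ++ [(true, ((lo : Int) + ((tail.takeWhile (· == ' ')).length : Int),
                  (lo : Int) + ((tail.reverse.dropWhile (· == ' ')).length : Int)))],
           (lo : Int) + ((tail.reverse.dropWhile (· == ' ')).length : Int),
           ((csfull.length : Nat) : Int) + 1) := by
        have htw : (tail.takeWhile (· == ' ')).length + (tail.dropWhile (· == ' ')).length = tail.length := by
          conv_rhs => rw [← List.takeWhile_append_dropWhile (p := (· == ' ')) (l := tail)]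
          rw [List.length_append]
        have hdw0 : (tail.dropWhile (· == ' ')).length ≠ 0 := by
          intro h; exact hT (List.eq_nil_of_length_eq_zero h)
        simp only [altStep, hseg]
        rw [if_pos (by omega : ((tail.length : Int) - ((tail.dropWhile (· == ' ')).length : Int)) ≠ (tail.length : Int))]
        have hrl : (tail.reverse.dropWhile (· == ' ')).length ≤ tail.length := by
          calc _ ≤ tail.reverse.length := List.length_dropWhile_le _ _
          _ ≤ _ := by rw [List.length_reverse]
        simp only [List.length_reverse]
        have et : (tail.length : Int) - ((tail.dropWhile (· == ' ')).length : Int) =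
            ((tail.takeWhile (· == ' ')).length : Int) := by omega
        have ee : ((csfull.length : Nat) : Int) -
            ((tail.length : Int) - ((tail.reverse.dropWhile (· == ' ')).length : Int)) =
            (lo : Int) + ((tail.reverse.dropWhile (· == ' ')).length : Int) := by omega
        rw [et, ee]
      rw [hstep]
      simp only [finalizeB, hcu]
      rw [if_pos hT]
      have e1 : ((csfull.length : Nat) : Int) = (lo : Int) + (tail.length : Int) := by omega
      rw [e1]
      split_ifs <;> simp [List.append_assoc]
  | cons d rest =>
    set u := tail.takeWhile (fun c => !isDel c) with hu_def
    have hcu : tail = u ++ d :: rest := by rw [hsplit, hdw]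
    have hne : tail.dropWhile (fun c => !isDel c) ≠ [] := by rw [hdw]; simp
    have hd : isDel d = true := by
      have h0 := List.head_dropWhile_not (fun c => !isDel c) hne
      have hhead : (tail.dropWhile (fun c => !isDel c)).head hne = d := by simp [hdw]
      rw [hhead] at h0
      simpa using h0
    have hrm : rest.length < m := by rw [← hm, hcu]; simp; omega
    have hltail : tail.length = u.length + 1 + rest.length := by rw [hcu]; simp; omega
    have hblt : lo + u.length + 1 ≤ csfull.length := by omega
    have hrest : rest = csfull.drop (lo + u.length + 1) := by
      have h1 : tail.drop (u.length + 1) = rest := by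
        rw [hcu, show u ++ d :: rest = (u ++ [d]) ++ rest by simp]
        exact List.drop_left' (by simp)
      rw [← h1, htail, List.drop_drop]
      congr 1
    have hb : (lo : Int) + (u.length : Int) = ((lo + u.length : Nat) : Int) := by push_cast; ring
    have hseg : PySem.List.slice csfull (some (lo : Int)) (some ((lo : Int) + (u.length : Int))) = u := by
      rw [hb, PySem.List.slice_natCast, ← htail]
      rw [show lo + u.length - lo = u.length by omega]
      rw [hcu]
      exact List.take_left
    have hn : ¬ ((csfull.length : Nat) : Int) ≤ (lo : Int) + (u.length : Int) := by push_cast; omega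
    conv_lhs => rw [hcu]
    rw [anchorsE_decomp u huDF d hd rest (lo : Int), List.cons_append, List.foldl_cons]
    have e3 : (lo : Int) + (u.length : Int) + 1 = ((lo + u.length + 1 : Nat) : Int) := by push_cast; ring
    by_cases hT : u.dropWhile (· == ' ') = []
    · -- segment before the anchor is all spaces (or empty): the anchor breaks the span
      have hstep : altStep csfull ((csfull.length : Nat) : Int) (acc, p, (lo : Int)) ((lo : Int) + (u.length : Int)) =
          ((if p < (lo : Int) + (u.length : Int)
            then acc ++ [(false, (p, (lo : Int) + (u.length : Int)))] else acc),
           (lo : Int) + (u.length : Int), (lo : Int) + (u.length : Int) + 1) := by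
        simp only [altStep, hseg, hT, List.length_nil, Nat.cast_zero, sub_zero, ne_eq,
          not_true_eq_false, if_false]
        rw [if_pos (show (lo : Int) + (u.length : Int) < ((csfull.length : Nat) : Int) by push_cast; omega)]
      rw [hstep, e3]
      rw [IH rest.length hrm rest rfl (lo + u.length + 1) ((lo : Int) + (u.length : Int)) _
        hrest (by omega) (by positivity) (by push_cast; omega)]
      simp only [hT, ne_eq, not_true_eq_false, if_false]
      split_ifs <;> simp [List.append_assoc]
    · -- segment before the anchor contains a tag: the anchor closes the tag span
      have hstep : altStep csfull ((csfull.length : Nat) : Int) (acc, p, (lo : Int)) ((lo : Int) + (u.length : Int)) =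
          ((if p < (lo : Int) + ((u.takeWhile (· == ' ')).length : Int)
            then acc ++ [(false, (p, (lo : Int) + ((u.takeWhile (· == ' ')).length : Int)))] else acc)
            ++ [(true, ((lo : Int) + ((u.takeWhile (· == ' ')).length : Int),
                  (lo : Int) + ((u.reverse.dropWhile (· == ' ')).length : Int)))],
           (lo : Int) + ((u.reverse.dropWhile (· == ' ')).length : Int),
           (lo : Int) + (u.length : Int) + 1) := by
        have htw : (u.takeWhile (· == ' ')).length + (u.dropWhile (· == ' ')).length = u.length := by
          conv_rhs => rw [← List.takeWhile_append_dropWhile (p := (· == ' ')) (l := u)]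
          rw [List.length_append]
        have hdw0 : (u.dropWhile (· == ' ')).length ≠ 0 := by
          intro h; exact hT (List.eq_nil_of_length_eq_zero h)
        simp only [altStep, hseg]
        rw [if_pos (by omega : ((u.length : Int) - ((u.dropWhile (· == ' ')).length : Int)) ≠ (u.length : Int))]
        simp only [List.length_reverse]
        have et : (u.length : Int) - ((u.dropWhile (· == ' ')).length : Int) =
            ((u.takeWhile (· == ' ')).length : Int) := by omega
        have ee : (lo : Int) + (u.length : Int) - ((u.length : Int) - ((u.reverse.dropWhile (· == ' ')).length : Int)) =
            (lo : Int) + ((u.reverse.dropWhile (· == ' ')).length : Int) := by ring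
        rw [et, ee]
      have hrl : (u.reverse.dropWhile (· == ' ')).length ≤ u.length := by
        calc _ ≤ u.reverse.length := List.length_dropWhile_le _ _
        _ ≤ _ := by rw [List.length_reverse]
      rw [hstep, e3]
      rw [IH rest.length hrm rest rfl (lo + u.length + 1)
        ((lo : Int) + ((u.reverse.dropWhile (· == ' ')).length : Int)) _
        hrest (by omega) (by positivity) (by push_cast; omega)]
      simp only [ne_eq, hT, not_false_eq_true, if_true]
      split_ifs <;> simp [List.append_assoc]

-- ===== VERDICT (by name: the statement is the Claim_ definition above) =====
theorem split_hed_string_spec : Claim_equal_split_hed_string := by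
  unfold Claim_equal_split_hed_string
  intro hs _
  unfold Spec_split_hed_string
  rw [split_eq_finalizeA hs, alt_eq_finalizeB hs]
  have hA := Amain hs.toList.length hs.toList rfl 0 0 0 [] le_rfl
  have hB := Bmain hs.toList hs.toList.length hs.toList rfl 0 0 [] (by simp) (Nat.zero_le _)
    le_rfl (by simp)
  rw [show ((0:Int) + (hs.toList.length : Int)) = (hs.toList.length : Int) by ring] at hA
  simp only [Nat.cast_zero] at hB
  rw [hA, hB]
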